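-- pv_equiv track=rewrite | github.com/Ki11erRabbit/Koka-GTK | gir-koka/model.py | convert_to_koka
-- ===== SOURCE A (Python) =====
-- def convert_to_koka(name):
--     out = ''
--     for c in name:
--         if c == '.':
--             out = '-'
--         else:
--             out += c.lower()
--     return out
-- ===== SOURCE B (Python) =====
-- def convert_to_koka(name):
--     if '.' in name:
--         return '-' + name.rsplit('.', 1)[1].lower()
--     return name.lower()
-- ===== Notes on version B (the rewrite author's own statement) =====
-- stated objective: simpler
-- what changed: Replaces the per-character scan-and-reset accumulator loop (repeated string concatenation) by locating the last dot once (rsplit) and lowercasing the trailing segment, or the whole string when there is no dot.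
import Mathlib
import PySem

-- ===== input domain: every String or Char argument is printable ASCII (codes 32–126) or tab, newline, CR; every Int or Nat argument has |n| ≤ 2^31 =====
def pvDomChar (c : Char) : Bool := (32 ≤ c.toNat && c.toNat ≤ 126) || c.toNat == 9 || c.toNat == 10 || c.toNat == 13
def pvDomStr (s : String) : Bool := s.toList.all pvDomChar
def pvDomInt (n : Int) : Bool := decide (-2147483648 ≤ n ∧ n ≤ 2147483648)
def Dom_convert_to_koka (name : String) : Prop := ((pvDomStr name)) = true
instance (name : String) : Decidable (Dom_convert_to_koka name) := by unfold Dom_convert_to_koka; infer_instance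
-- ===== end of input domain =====

-- B replaces A's per-character scan-and-reset loop by splitting off the segment after the last dot and lowercasing it (simpler decomposition).


-- ===== PORT A =====
def convert_to_koka (name : String) : String :=
  String.ofList (name.toList.foldl
    (fun out c => if c = '.' then ['-'] else out ++ [PySem.Chars.lowerChar c]) [])

-- ===== PORT B =====
-- hand port of name.rsplit('.', 1)[1] for the branch where '.' occurs in name:
-- the segment after the last '.' (exact there)
def rsplitLastDot (cs : List Char) : List Char :=
  (cs.reverse.takeWhile (· ≠ '.')).reverse

def convert_to_koka_alt (name : String) : String :=
  if PySem.Str.isIn "." name then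
    String.ofList ('-' :: PySem.Chars.lower (rsplitLastDot name.toList))
  else
    PySem.Str.lower name

-- ===== PRECONDITION & SPEC =====
def Spec_convert_to_koka (name : String) (out : String) : Prop := out = convert_to_koka_alt name
instance (name : String) (out : String) : Decidable (Spec_convert_to_koka name out) := by unfold Spec_convert_to_koka; infer_instance

-- ===== CLAIM (what is proved, stated in full; the proofs are below) =====
def Claim_equal_convert_to_koka : Prop := ∀ (name : String), Dom_convert_to_koka name → Spec_convert_to_koka name (convert_to_koka name)

-- ===== LEMMAS AND PROOFS =====
theorem singleton_infix_iff_mem (c : Char) (cs : List Char) : [c] <:+: cs ↔ c ∈ cs := by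
  constructor
  · intro h; exact h.subset (List.mem_singleton_self c)
  · intro h
    obtain ⟨s, t, rfl⟩ := List.append_of_mem h
    exact ⟨s, t, by simp⟩

theorem rsplitLastDot_concat_dot (cs : List Char) : rsplitLastDot (cs ++ ['.']) = [] := by
  simp [rsplitLastDot]

theorem rsplitLastDot_concat_ne (cs : List Char) (c : Char) (h : c ≠ '.') :
    rsplitLastDot (cs ++ [c]) = rsplitLastDot cs ++ [c] := by
  simp [rsplitLastDot, h]

theorem foldA_eq (cs : List Char) :
    ∀ acc : List Char,
      cs.foldl (fun out c => if c = '.' then ['-'] else out ++ [PySem.Chars.lowerChar c]) acc =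
        if '.' ∈ cs then '-' :: PySem.Chars.lower (rsplitLastDot cs)
        else acc ++ PySem.Chars.lower cs := by
  induction cs using List.reverseRecOn with
  | nil => intro acc; simp [PySem.Chars.lower]
  | append_singleton cs c ih =>
    intro acc
    rw [List.foldl_append]
    by_cases hc : c = '.'
    · subst hc
      simp [rsplitLastDot_concat_dot, PySem.Chars.lower]
    · rw [ih]
      by_cases hmem : '.' ∈ cs
      · simp [hmem, hc, rsplitLastDot_concat_ne cs c hc, PySem.Chars.lower]
      · have hc' : ('.' : Char) ≠ c := fun h => hc h.symm
        simp [hmem, hc, hc', PySem.Chars.lower]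

-- ===== VERDICT (by name: the statement is the Claim_ definition above) =====
theorem convert_to_koka_spec : Claim_equal_convert_to_koka := by
  intro name _
  unfold Spec_convert_to_koka convert_to_koka convert_to_koka_alt
  rw [foldA_eq]
  by_cases hmem : '.' ∈ name.toList
  · have hin : PySem.Chars.isIn ['.'] name.toList = true :=
      (PySem.Chars.isIn_iff_infix _ _).mpr ((singleton_infix_iff_mem '.' name.toList).mpr hmem)
    simp [hmem, hin]
  · have hin : PySem.Chars.isIn ['.'] name.toList = false :=
      (PySem.Chars.isIn_eq_false_iff _ _).mpr (fun h => hmem ((singleton_infix_iff_mem '.' name.toList).mp h))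
    simp [hmem, hin, PySem.Str.lower]
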